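-- pv_equiv track=rewrite | github.com/SabrinaHirani/DMOJ | ccc18j3.py | dist_from_next_city
-- ===== SOURCE A (Python) =====
-- def dist_from_next_city(x, dist):
--     res = ''
--     for i in range(5):
--         if (i == x):
--             res += '0' + ' '
--         elif (i < x):
--             res += str(str((sum(dist[i+1:x+1]))) + str(' '))
--         else:
--             res += str(str((sum(dist[x+1:i+1]))) + str(' '))
--     return res
-- ===== SOURCE B (Python) =====
-- def dist_from_next_city(x, dist):
--     n = len(dist)
--     P = [0]
--     s = 0
--     for d in dist:
--         s += d
--         P.append(s)
--     res = ''
--     for i in range(5):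
--         hi = min(max(i, x) + 1, n)
--         lo = min(max(min(i, x) + 1, 0), n)
--         res += str(P[hi] - P[lo]) + ' '
--     return res
-- ===== Notes on version B (the rewrite author's own statement) =====
-- stated objective: simpler
-- what changed: B precomputes a prefix-sum table in one pass and emits each distance as an O(1) difference of two clamped table lookups, replacing A's three-way branch with per-city slice re-summing.
-- outside the precondition, e.g. on dist_from_next_city(-2, [1, 2, 3, 4]): A returns '0 0 0 4 4 ', B returns '1 3 6 10 10 '
import Mathlib
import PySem

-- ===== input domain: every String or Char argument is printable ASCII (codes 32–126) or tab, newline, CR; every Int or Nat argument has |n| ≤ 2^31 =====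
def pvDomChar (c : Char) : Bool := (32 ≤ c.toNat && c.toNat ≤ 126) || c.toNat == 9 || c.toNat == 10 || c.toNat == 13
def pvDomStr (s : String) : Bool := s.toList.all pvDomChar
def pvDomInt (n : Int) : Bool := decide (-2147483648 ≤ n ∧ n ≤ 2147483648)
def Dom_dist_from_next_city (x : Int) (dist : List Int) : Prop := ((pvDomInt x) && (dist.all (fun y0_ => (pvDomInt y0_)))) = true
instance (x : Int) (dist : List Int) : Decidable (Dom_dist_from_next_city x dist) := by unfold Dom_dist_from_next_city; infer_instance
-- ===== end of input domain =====

-- B replaces A's per-city slice re-summing with one prefix-sum table and O(1) lookups (simpler: no branch triple, no slices).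

-- ===== PORT A =====
-- loop body of A: the three-way branch appending to res
def pvAstep (x : Int) (dist : List Int) (res : String) (i : Int) : String :=
  if i == x then res ++ ("0" ++ " ")
  else if i < x then res ++ (PySem.Int.toStr (PySem.List.slice dist (some (i + 1)) (some (x + 1))).sum ++ " ")
  else res ++ (PySem.Int.toStr (PySem.List.slice dist (some (x + 1)) (some (i + 1))).sum ++ " ")

def dist_from_next_city (x : Int) (dist : List Int) : String :=
  (PySem.List.pyRange 0 5 1).foldl (pvAstep x dist) ""

-- ===== PORT B =====
-- the prefix-sum table P: P = [0]; s = 0; for d in dist: s += d; P.append(s)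
def pvPrefix (dist : List Int) : List Int :=
  (dist.foldl (fun (a : List Int × Int) d => (a.1 ++ [a.2 + d], a.2 + d)) ([0], 0)).1

-- loop body of B: res += str(P[hi] - P[lo]) + ' '
def pvBstep (P : List Int) (n x : Int) (res : String) (i : Int) : String :=
  res ++ (PySem.Int.toStr (PySem.List.pyGetD P (min (max i x + 1) n) 0
                          - PySem.List.pyGetD P (min (max (min i x + 1) 0) n) 0) ++ " ")

def dist_from_next_city_alt (x : Int) (dist : List Int) : String :=
  (PySem.List.pyRange 0 5 1).foldl (pvBstep (pvPrefix dist) (dist.length : Int) x) ""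

-- ===== PRECONDITION & SPEC =====
-- Pre_ excludes x ≤ -2 whose negative slice bound x+1 wraps to an index inside the list (dist.length + x + 1 > 0),
-- where A sums from that wrapped index — an accident of Python's negative indexing outside the problem's
-- 5-city domain 0..4; B clamps the bound to 0 there.
def Pre_dist_from_next_city (x : Int) (dist : List Int) : Prop := -1 ≤ x ∨ (dist.length : Int) + x + 1 ≤ 0
instance (x : Int) (dist : List Int) : Decidable (Pre_dist_from_next_city x dist) := by unfold Pre_dist_from_next_city; infer_instance
def pvWitness_dist_from_next_city : Int × List Int := (2, [3, 1, 4, 1, 5])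

def Spec_dist_from_next_city (x : Int) (dist : List Int) (out : String) : Prop := out = dist_from_next_city_alt x dist
instance (x : Int) (dist : List Int) (out : String) : Decidable (Spec_dist_from_next_city x dist out) := by unfold Spec_dist_from_next_city; infer_instance

-- ===== CLAIM (what is proved, stated in full; the proofs are below) =====
def Claim_equal_dist_from_next_city : Prop := ∀ (x : Int) (dist : List Int), Dom_dist_from_next_city x dist → Pre_dist_from_next_city x dist → Spec_dist_from_next_city x dist (dist_from_next_city x dist)

-- ===== LEMMAS AND PROOFS =====

-- the fold building P yields exactly the list of prefix sums
theorem pvPrefix_fold (dist acc : List Int) (s : Int) :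
    (dist.foldl (fun (a : List Int × Int) d => (a.1 ++ [a.2 + d], a.2 + d)) (acc, s)).1
      = acc ++ (List.range dist.length).map (fun k => s + (dist.take (k + 1)).sum) := by
  induction dist generalizing acc s with
  | nil => simp
  | cons d ds ih =>
      simp only [List.foldl_cons, ih, List.length_cons, List.range_succ_eq_map, List.map_cons,
        List.map_map]
      simp [List.append_assoc, Function.comp, add_assoc]

theorem pvPrefix_eq (dist : List Int) :
    pvPrefix dist = (List.range (dist.length + 1)).map (fun k => (dist.take k).sum) := by
  unfold pvPrefix
  rw [pvPrefix_fold]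
  simp [List.range_succ_eq_map, List.map_map, Function.comp]

-- looking up the table at 0 ≤ j ≤ n gives the prefix sum up to j
theorem pvPrefix_get (dist : List Int) (j : Int) (h0 : 0 ≤ j) (hn : j ≤ (dist.length : Int)) :
    PySem.List.pyGetD (pvPrefix dist) j 0 = (dist.take j.toNat).sum := by
  rw [PySem.List.pyGetD_eq_getElem (pvPrefix dist) 0 h0
    (by rw [pvPrefix_eq]; simp; omega)]
  rw [List.getElem_of_eq (pvPrefix_eq dist)]
  simp

-- a Python slice sum with 0 ≤ a ≤ b is a difference of prefix sums (take clamps just as the slice does)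
theorem pvSlice_sum (dist : List Int) (a b : Int) (h0 : 0 ≤ a) (hab : a ≤ b) :
    (PySem.List.slice dist (some a) (some b)).sum
      = (dist.take b.toNat).sum - (dist.take a.toNat).sum := by
  rw [PySem.List.slice_toNat dist h0 (le_trans h0 hab)]
  have : dist.take b.toNat = dist.take a.toNat ++ (dist.drop a.toNat).take (b.toNat - a.toNat) := by
    rw [← List.take_add]
    congr 1
    omega
  rw [this, List.sum_append]
  ring

-- taking past the length changes nothing: take (min j n) = take j for j ≥ 0
theorem pvTake_min (dist : List Int) (j : Int) (h0 : 0 ≤ j) :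
    dist.take (min j (dist.length : Int)).toNat = dist.take j.toNat := by
  rcases le_total j (dist.length : Int) with h | h
  · rw [min_eq_left h]
  · rw [min_eq_right h]
    rw [List.take_of_length_le (by omega), List.take_of_length_le (by omega)]

-- the two loop bodies agree for 0 ≤ i and 0 ≤ x
theorem pvStep_eq (x : Int) (dist : List Int)
    (hp : -1 ≤ x ∨ (dist.length : Int) + x + 1 ≤ 0) (res : String) (i : Int) (hi : 0 ≤ i) :
    pvAstep x dist res i = pvBstep (pvPrefix dist) (dist.length : Int) x res i := by
  unfold pvAstep pvBstep
  have hget : ∀ j : Int, 0 ≤ j →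
      PySem.List.pyGetD (pvPrefix dist) (min j (dist.length : Int)) 0 = (dist.take j.toNat).sum := by
    intro j hj
    rw [pvPrefix_get dist _ (by omega) (by omega), pvTake_min dist j hj]
  by_cases hx : 0 ≤ x
  case neg =>
    -- x ≤ -1: A's slice start clamps to 0 (x = -1, or the wrapped index falls before the list)
    have hclamp : PySem.List.clampIdx dist.length (x + 1) = 0 := by
      simp only [PySem.List.clampIdx]
      split_ifs <;> omega
    have hne : (i == x) = false := by simp; omega
    rw [hne]
    simp only [Bool.false_eq_true, if_false]
    rw [if_neg (by omega)]
    have h1 : max i x = i := max_eq_left (by omega)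
    have h2 : min i x = x := min_eq_right (by omega)
    rw [h1, h2, max_eq_right (by omega : x + 1 ≤ 0)]
    rw [hget (i + 1) (by omega)]
    have h0 : PySem.List.pyGetD (pvPrefix dist) (min 0 (dist.length : Int)) 0 = 0 := by
      rw [min_eq_left (by positivity)]
      rw [pvPrefix_get dist 0 le_rfl (by positivity)]
      simp
    rw [h0, sub_zero]
    have hsl : PySem.List.slice dist (some (x + 1)) (some (i + 1)) = dist.take (i + 1).toNat := by
      have hci : PySem.List.clampIdx dist.length (i + 1) = min (i + 1).toNat dist.length := by
        simp only [PySem.List.clampIdx, if_neg (by omega : ¬ i + 1 < 0)]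
      simp only [PySem.List.slice, hclamp, hci, Nat.sub_zero, List.drop_zero]
      rcases le_total (i + 1).toNat dist.length with h | h
      · rw [min_eq_left h]
      · rw [min_eq_right h]
        rw [List.take_of_length_le le_rfl, List.take_of_length_le (by omega)]
    rw [hsl]
  by_cases hix : i = x
  · subst hix
    simp only [beq_self_eq_true, if_true, max_self, min_self]
    rw [max_eq_left (by omega)]
    rw [hget (i + 1) (by omega)]
    simp only [sub_self]
    congr 1
  · have hne : (i == x) = false := by simp [hix]
    rw [hne]
    simp only [Bool.false_eq_true, if_false]
    rcases lt_or_gt_of_ne hix with hlt | hgt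
    · rw [if_pos hlt]
      rw [max_eq_right (le_of_lt hlt), min_eq_left (le_of_lt hlt)]
      rw [max_eq_left (by omega)]
      rw [hget (x + 1) (by omega), hget (i + 1) (by omega)]
      rw [pvSlice_sum dist (i + 1) (x + 1) (by omega) (by omega)]
    · rw [if_neg (by omega)]
      rw [max_eq_left (le_of_lt hgt), min_eq_right (le_of_lt hgt)]
      rw [max_eq_left (by omega)]
      rw [hget (i + 1) (by omega), hget (x + 1) (by omega)]
      rw [pvSlice_sum dist (x + 1) (i + 1) (by omega) (by omega)]

-- ===== VERDICT (by name: the statement is the Claim_ definition above) =====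
theorem dist_from_next_city_spec : Claim_equal_dist_from_next_city := by
  intro x dist _ hpre
  unfold Spec_dist_from_next_city dist_from_next_city dist_from_next_city_alt
  refine PySem.List.foldl_congr_mem _ _ _ _ ?_
  intro res i hmem
  have hi : 0 ≤ i := ((PySem.List.mem_pyRange_one).1 hmem).1
  exact pvStep_eq x dist hpre res i hi
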